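-- pv_equiv track=rewrite | github.com/MukileshT/study-assistant-mcp | src/planning/learning_optimizer.py | recommend_interleaving
-- ===== SOURCE A (Python) =====
-- from typing import List, Dict, Any, Optional
--
-- def recommend_interleaving(
--
--     subjects: List[str],
--     session_count: int,
-- ) -> List[str]:
--     """
--     Recommend interleaved subject order for better learning.
--
--     Args:
--         subjects: List of subjects to study
--         session_count: Number of study sessions
--
--     Returns:
--         Ordered list of subjects (interleaved)
--     """
--     if len(subjects) <= 1:
--         return subjects * session_count
--
--     # Interleave subjects to avoid massed practice
--     interleaved = []
--     for i in range(session_count):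
--         # Rotate through subjects
--         subject_index = i % len(subjects)
--         interleaved.append(subjects[subject_index])
--
--     return interleaved
-- ===== SOURCE B (Python) =====
-- def recommend_interleaving(subjects, session_count):
--     """Same result as A: replicate the subject list enough times and truncate,
--     instead of indexing session-by-session with i % len."""
--     if len(subjects) <= 1:
--         return subjects * session_count
--     repeats = -(-session_count // len(subjects))  # ceil division; <= 0 for non-positive counts
--     return (subjects * repeats)[:session_count]
-- ===== Notes on version B (the rewrite author's own statement) =====
-- stated objective: idiomatic
-- what changed: Replaces the per-session loop indexing subjects[i % len] with a closed-form replicate-and-truncate: the subject list is repeated ceil(session_count/len) times and sliced to session_count.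
import Mathlib
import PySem

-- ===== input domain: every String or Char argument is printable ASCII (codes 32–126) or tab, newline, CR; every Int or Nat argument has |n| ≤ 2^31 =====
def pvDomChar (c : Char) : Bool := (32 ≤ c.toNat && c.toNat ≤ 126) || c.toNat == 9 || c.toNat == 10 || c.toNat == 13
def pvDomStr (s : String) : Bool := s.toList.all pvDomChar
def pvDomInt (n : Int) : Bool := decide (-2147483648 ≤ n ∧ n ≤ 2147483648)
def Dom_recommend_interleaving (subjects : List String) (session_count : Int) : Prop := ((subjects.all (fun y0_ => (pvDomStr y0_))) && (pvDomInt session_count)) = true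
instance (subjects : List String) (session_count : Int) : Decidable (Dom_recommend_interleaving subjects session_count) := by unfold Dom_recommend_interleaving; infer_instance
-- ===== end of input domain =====

-- B replaces A's modular-index loop by replicate-and-truncate (idiomatic closed form); same return value on every input.

-- ===== PORT A =====
-- subjects[i % len(subjects)] is always in range (0 ≤ i % len < len for len ≥ 2), so pyGetD with
-- default "" is exact here.
def recommend_interleaving (subjects : List String) (session_count : Int) : List String :=
  if subjects.length ≤ 1 then
    PySem.List.pyRepeat subjects session_count
  else
    (PySem.List.pyRange 0 session_count 1).foldl
      (fun interleaved i =>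
        interleaved ++ [PySem.List.pyGetD subjects (PySem.Int.mod i (subjects.length : Int)) ""]) []

-- ===== PORT B =====
def recommend_interleaving_alt (subjects : List String) (session_count : Int) : List String :=
  if subjects.length ≤ 1 then
    PySem.List.pyRepeat subjects session_count
  else
    let repeats := -(PySem.Int.floordiv (-session_count) (subjects.length : Int))
    PySem.List.slice (PySem.List.pyRepeat subjects repeats) none (some session_count)

-- ===== PRECONDITION & SPEC =====
def Spec_recommend_interleaving (subjects : List String) (session_count : Int) (out : List String) : Prop := out = recommend_interleaving_alt subjects session_count
instance (subjects : List String) (session_count : Int) (out : List String) : Decidable (Spec_recommend_interleaving subjects session_count out) := by unfold Spec_recommend_interleaving; infer_instance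

-- ===== CLAIM (what is proved, stated in full; the proofs are below) =====
def Claim_equal_recommend_interleaving : Prop := ∀ (subjects : List String) (session_count : Int), Dom_recommend_interleaving subjects session_count → Spec_recommend_interleaving subjects session_count (recommend_interleaving subjects session_count)

-- ===== LEMMAS AND PROOFS =====

-- Element k of xs repeated m times is xs[k % xs.length], as long as k is in range.
theorem getElem?_flatten_replicate {α : Type} (xs : List α) (m k : Nat)
    (hk : k < m * xs.length) :
    ((List.replicate m xs).flatten)[k]? = xs[k % xs.length]? := by
  induction m generalizing k with
  | zero => simp at hk
  | succ m ih =>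
    have hm : (m + 1) * xs.length = xs.length + m * xs.length := by ring
    rw [hm] at hk
    rw [List.replicate_succ, List.flatten_cons]
    by_cases h : k < xs.length
    · rw [List.getElem?_append_left h, Nat.mod_eq_of_lt h]
    · rw [List.getElem?_append_right (by omega)]
      have : (k - xs.length) % xs.length = k % xs.length := by
        conv_rhs => rw [← Nat.sub_add_cancel (Nat.le_of_not_lt h)]
        rw [Nat.add_mod_right]
      rw [ih (k - xs.length) (by omega), this]

theorem recommend_interleaving_spec : Claim_equal_recommend_interleaving := by
  unfold Claim_equal_recommend_interleaving Spec_recommend_interleaving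
  intro subjects n _
  unfold recommend_interleaving recommend_interleaving_alt
  by_cases h1 : subjects.length ≤ 1
  · simp [h1]
  · simp only [h1, if_false]
    set L : Nat := subjects.length with hL
    have hLpos : (0:Int) < (L:Int) := by
      have : 2 ≤ L := by omega
      exact_mod_cast Nat.lt_of_lt_of_le (by norm_num) this
    set r : Int := -(PySem.Int.floordiv (-n) (L:Int)) with hr
    have hbr : (r - 1) * L < n ∧ n ≤ r * L :=
      (PySem.Int.neg_floordiv_neg_eq_iff_of_pos hLpos).mp hr.symm
    rw [PySem.List.foldl_append_singleton_eq_map, List.nil_append]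
    by_cases hn : 0 < n
    · -- positive session count
      have hr0 : 0 < r := by nlinarith [hbr.2]
      have hlen : n.toNat ≤ r.toNat * L := by
        have := hbr.2
        zify; rw [Int.toNat_of_nonneg (le_of_lt hn)]
        calc n ≤ r * L := hbr.2
          _ = (r.toNat : Int) * L := by rw [Int.toNat_of_nonneg (le_of_lt hr0)]
      rw [PySem.List.slice_to _ (le_of_lt hn)]
      unfold PySem.List.pyRepeat
      apply List.ext_getElem?
      intro k
      rw [List.getElem?_map, PySem.List.getElem?_pyRange_one]
      simp only [Int.sub_zero, Int.zero_add]
      by_cases hk : k < n.toNat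
      · rw [List.getElem?_take_of_lt hk, if_pos hk]
        simp only [Option.map_some]
        rw [getElem?_flatten_replicate subjects r.toNat k (Nat.lt_of_lt_of_le hk hlen)]
        have hmod : PySem.Int.mod (k:Int) ((L:Nat):Int) = ((k % L : Nat) : Int) :=
          PySem.Int.mod_natCast k L
        rw [hmod, PySem.List.pyGetD_natCast]
        have hkL : k % L < L := Nat.mod_lt _ (by omega)
        rw [List.getD_eq_getElem?_getD, List.getElem?_eq_getElem (by omega : k % L < subjects.length)]
        rfl
      · rw [if_neg hk, List.getElem?_eq_none]
        · simp
        · simp only [List.length_take, List.length_flatten]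
          omega
    · -- non-positive session count: both sides empty
      have hrange : PySem.List.pyRange 0 n 1 = [] :=
        PySem.List.pyRange_one_eq_nil (by omega)
      have hr0 : r ≤ 0 := by nlinarith [hbr.1]
      have : PySem.List.pyRepeat subjects r = [] := by
        unfold PySem.List.pyRepeat
        rw [show r.toNat = 0 by omega]
        simp
      rw [hrange, this]
      simp [PySem.List.slice]
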